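-- pv_equiv track=rewrite | github.com/eric22gh/Python-course | Interview_Practice/Day_51to55_off_exercices.py | generar_expresiones
-- ===== SOURCE A (Python) =====
-- import itertools
--
-- operadores = ['+', '-', '*', '//', '**']
--
-- def generar_expresiones(digitos):
--     expresiones = []
--     # Generar todas las formas de insertar operadores entre dígitos
--     for ops in itertools.product(operadores, repeat=len(digitos)-1):
--         partes = []
--         for i in range(len(digitos)):
--             partes.append(digitos[i])
--             if i < len(ops):
--                 partes.append(ops[i])
--         expresiones.append(''.join(partes))
--     return expresiones
-- ===== SOURCE B (Python) =====
-- operadores = ['+', '-', '*', '//', '**']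
--
-- def generar_expresiones(digitos):
--     # Incremental: grow partial expressions digit by digit instead of
--     # materializing operator tuples with itertools.product.
--     expresiones = [digitos[0]]
--     for d in digitos[1:]:
--         expresiones = [p + op + d for p in expresiones for op in operadores]
--     return expresiones
-- ===== Notes on version B (the rewrite author's own statement) =====
-- stated objective: alternative
-- what changed: B grows a running list of partial expressions digit by digit (partials outer, operators inner), instead of A's itertools.product over operator tuples plus an inner interleaving loop and join per tuple.
import Mathlib
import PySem

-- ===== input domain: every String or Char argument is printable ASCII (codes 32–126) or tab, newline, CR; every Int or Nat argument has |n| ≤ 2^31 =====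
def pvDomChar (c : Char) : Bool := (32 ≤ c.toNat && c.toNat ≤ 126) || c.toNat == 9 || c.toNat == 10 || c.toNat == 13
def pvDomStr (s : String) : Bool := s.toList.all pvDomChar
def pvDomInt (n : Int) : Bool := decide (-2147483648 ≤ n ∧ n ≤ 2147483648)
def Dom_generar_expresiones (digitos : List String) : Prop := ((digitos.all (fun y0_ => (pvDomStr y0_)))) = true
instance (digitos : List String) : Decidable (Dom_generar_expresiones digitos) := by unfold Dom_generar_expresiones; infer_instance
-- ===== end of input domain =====

-- B replaces A's itertools.product-over-operator-tuples (plus an interleave/join pass per tuple)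
-- by incrementally growing a list of partial expressions digit by digit: an alternative decomposition, not faster.


-- ===== PORT A =====
-- operadores = ['+', '-', '*', '//', '**']
def operadores : List String := ["+", "-", "*", "//", "**"]

-- itertools.product(operadores, repeat=n), ported by hand (exact: leftmost coordinate varies slowest)
def pvProdRep : Nat → List (List String)
  | 0 => [[]]
  | n + 1 => operadores.flatMap (fun o => (pvProdRep n).map (fun t => o :: t))

-- the inner 'for i in range(len(digitos))' loop of A as the obvious structural recursion
-- over (digitos, ops): append digitos[i], then ops[i] while i < len(ops)
def pvInterleave : List String → List String → List String
  | [], _ => []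
  | d :: ds, [] => d :: pvInterleave ds []
  | d :: ds, o :: os => d :: o :: pvInterleave ds os

-- on empty digitos Python's product(…, repeat=-1) raises ValueError: excluded by Pre_ below
def generar_expresiones (digitos : List String) : List String :=
  (pvProdRep (digitos.length - 1)).foldl
    (fun expresiones ops => expresiones ++ [PySem.Str.join "" (pvInterleave digitos ops)]) []

-- ===== PORT B =====
def generar_expresiones_alt (digitos : List String) : List String :=
  match digitos with
  | [] => []  -- Python B raises IndexError here (outside Pre_)
  | d0 :: rest =>
    rest.foldl
      (fun expresiones d => expresiones.flatMap (fun p => operadores.map (fun op => p ++ op ++ d)))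
      [d0]

-- ===== PRECONDITION & SPEC =====
-- Pre_ excludes only the empty list, on which both Pythons raise (A: ValueError from repeat=-1; B: IndexError)
def Pre_generar_expresiones (digitos : List String) : Prop := digitos ≠ []
instance (digitos : List String) : Decidable (Pre_generar_expresiones digitos) := by
  unfold Pre_generar_expresiones; infer_instance
def pvWitness_generar_expresiones : List String := ["1", "2", "3"]

def Spec_generar_expresiones (digitos : List String) (out : List String) : Prop := out = generar_expresiones_alt digitos
instance (digitos : List String) (out : List String) : Decidable (Spec_generar_expresiones digitos out) := by unfold Spec_generar_expresiones; infer_instance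

-- ===== CLAIM (what is proved, stated in full; the proofs are below) =====
def Claim_equal_generar_expresiones : Prop := ∀ (digitos : List String), Dom_generar_expresiones digitos → Pre_generar_expresiones digitos → Spec_generar_expresiones digitos (generar_expresiones digitos)

-- ===== LEMMAS AND PROOFS =====

-- o1 ++ d1 ++ o2 ++ d2 ++ … : the body of an expression after its leading digit
def pvCat : List String → List String → String
  | o :: os, d :: ds => o ++ (d ++ pvCat os ds)
  | _, _ => ""

theorem pv_join_cons_cons (a b : String) (l : List String) :
    PySem.Str.join "" (a :: b :: l) = a ++ PySem.Str.join "" (b :: l) := by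
  have h : (PySem.Str.join "" (a :: b :: l)).toList = (a ++ PySem.Str.join "" (b :: l)).toList := by
    simp [PySem.Str.toList_join, PySem.Chars.join_cons_cons, String.toList_append]
  exact String.toList_injective h

theorem pv_mem_prodRep_length (n : Nat) (os : List String) (h : os ∈ pvProdRep n) :
    os.length = n := by
  induction n generalizing os with
  | zero => simp [pvProdRep] at h; simp [h]
  | succ n ih =>
    simp only [pvProdRep, List.mem_flatMap, List.mem_map] at h
    obtain ⟨o, -, t, ht, rfl⟩ := h
    simp [ih t ht]

theorem pv_join_interleave (os : List String) :
    ∀ (ds : List String) (d : String), os.length = ds.length →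
      PySem.Str.join "" (pvInterleave (d :: ds) os) = d ++ pvCat os ds := by
  induction os with
  | nil =>
    intro ds d h
    obtain rfl : ds = [] := by simpa using h.symm
    have : PySem.Str.join "" [d] = d := by
      have h2 : (PySem.Str.join "" [d]).toList = d.toList := by
        simp [PySem.Str.toList_join, PySem.Chars.join_singleton]
      exact String.toList_injective h2
    simp [pvInterleave, pvCat, this]
  | cons o os ih =>
    intro ds d h
    match ds with
    | [] => simp at h
    | d' :: ds' =>
      have hlen : os.length = ds'.length := by simpa using h
      have hih := ih ds' d' hlen
      have hne : pvInterleave (d' :: ds') os ≠ [] := by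
        cases os <;> simp [pvInterleave]
      obtain ⟨x, xs, hx⟩ := List.exists_cons_of_ne_nil hne
      calc PySem.Str.join "" (pvInterleave (d :: d' :: ds') (o :: os))
          = PySem.Str.join "" (d :: o :: pvInterleave (d' :: ds') os) := by simp [pvInterleave]
        _ = d ++ PySem.Str.join "" (o :: pvInterleave (d' :: ds') os) := by
              rw [hx]; exact pv_join_cons_cons d o (x :: xs)
        _ = d ++ (o ++ PySem.Str.join "" (pvInterleave (d' :: ds') os)) := by
              rw [hx, pv_join_cons_cons]
        _ = d ++ (o ++ (d' ++ pvCat os ds')) := by rw [hih]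
        _ = d ++ pvCat (o :: os) (d' :: ds') := by simp [pvCat]

theorem pv_alt_fold (ds : List String) :
    ∀ (E : List String),
      ds.foldl (fun expresiones d =>
          expresiones.flatMap (fun p => operadores.map (fun op => p ++ op ++ d))) E
        = E.flatMap (fun p => (pvProdRep ds.length).map (fun os => p ++ pvCat os ds)) := by
  induction ds with
  | nil =>
    intro E
    simp [pvProdRep, pvCat, List.flatMap_singleton']
  | cons d ds ih =>
    intro E
    rw [List.foldl_cons, ih]
    simp only [List.flatMap_assoc, List.flatMap_map, List.map_flatMap, List.map_map,
      List.length_cons, pvProdRep, Function.comp_def]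
    simp only [pvCat, String.append_assoc]

-- ===== VERDICT (by name: the statement is the Claim_ definition above) =====
theorem generar_expresiones_spec : Claim_equal_generar_expresiones := by
  intro digitos _ hpre
  unfold Spec_generar_expresiones
  obtain ⟨d0, rest, rfl⟩ := List.exists_cons_of_ne_nil hpre
  unfold generar_expresiones generar_expresiones_alt
  dsimp only
  rw [pv_alt_fold]
  rw [PySem.List.foldl_append_singleton_eq_map]
  simp only [List.length_cons, Nat.add_sub_cancel, List.flatMap_cons, List.flatMap_nil,
    List.append_nil]
  apply List.map_congr_left
  intro os hos
  exact pv_join_interleave os rest d0 (pv_mem_prodRep_length rest.length os hos)
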